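-- pv_equiv track=rewrite | github.com/mklug/RandomTree | dyck.py | is_dyck
-- ===== SOURCE A (Python) =====
-- def is_dyck(w: list[str]) -> bool:
--     '''Checks the input is a Dyck path.
--     '''
--     wx = w.count('x')
--     wy = w.count('y')
--     N = len(w)
--
--     if wx != wy or wx + wy != N:
--         return False
--
--     height = 0
--     for c in w:
--         if c == 'x':
--             height += 1
--         elif c == 'y':
--             height -= 1
--         if height < 0:
--             return False
--     return True
-- ===== SOURCE B (Python) =====
-- def is_dyck(w: list[str]) -> bool:
--     # Divide and conquer: summarize each half as (total, min-prefix) of the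
--     # +1/-1 step sequence and combine the summaries; valid iff the whole
--     # summary is (0, 0) and no foreign character appears.
--     def scan(lo, hi):
--         if hi - lo == 0:
--             return (0, 0)
--         if hi - lo == 1:
--             c = w[lo]
--             if c == 'x':
--                 return (1, 0)
--             if c == 'y':
--                 return (-1, -1)
--             return None
--         mid = (lo + hi) // 2
--         left = scan(lo, mid)
--         right = scan(mid, hi)
--         if left is None or right is None:
--             return None
--         t1, m1 = left
--         t2, m2 = right
--         return (t1 + t2, min(m1, t1 + m2))
--     return scan(0, len(w)) == (0, 0)
-- ===== Notes on version B (the rewrite author's own statement) =====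
-- stated objective: alternative
-- what changed: B replaces A's count-passes-plus-left-to-right height scan with a divide-and-conquer algorithm that recursively summarizes each half of w as a (total, minimum-prefix-sum) pair (None on a foreign character) and combines the two summaries with the monoid rule (t1+t2, min(m1, t1+m2)); the word is Dyck iff the whole summary is (0, 0).
import Mathlib
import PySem

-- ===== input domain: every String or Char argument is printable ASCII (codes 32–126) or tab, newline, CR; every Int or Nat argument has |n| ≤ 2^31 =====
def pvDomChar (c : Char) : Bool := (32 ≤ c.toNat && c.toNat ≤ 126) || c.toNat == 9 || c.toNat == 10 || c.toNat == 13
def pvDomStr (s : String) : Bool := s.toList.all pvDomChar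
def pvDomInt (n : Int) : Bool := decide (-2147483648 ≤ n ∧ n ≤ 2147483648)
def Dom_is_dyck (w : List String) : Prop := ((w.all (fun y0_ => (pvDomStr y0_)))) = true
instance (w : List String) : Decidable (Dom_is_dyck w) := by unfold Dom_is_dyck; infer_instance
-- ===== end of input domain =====

-- B replaces A's count passes + height scan with a divide-and-conquer (total, min-prefix) summary; objective: alternative.

-- ===== PORT A =====
-- the 'for c in w' loop with early return on height < 0
def isDyckLoopA : List String → Int → Bool
  | [], _ => true
  | c :: rest, height =>
    let height' := if c == "x" then height + 1 else if c == "y" then height - 1 else height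
    if height' < 0 then false else isDyckLoopA rest height'

def is_dyck (w : List String) : Bool :=
  let wx : Int := PySem.List.count w "x"
  let wy : Int := PySem.List.count w "y"
  let N : Int := w.length
  if wx ≠ wy ∨ wx + wy ≠ N then false
  else isDyckLoopA w 0

-- ===== PORT B =====
-- scan(lo, hi): (total, min prefix sum) of w[lo:hi], none on a foreign character.
-- (the pyGet? 'none' branch is unreachable: lo < hi ≤ len w whenever it is read)
def scanDC (w : List String) (lo hi : Nat) : Option (Int × Int) :=
  if hi - lo = 0 then some (0, 0)
  else if hi - lo = 1 then
    match PySem.List.pyGet? w (lo : Int) with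
    | none => none
    | some c =>
      if c == "x" then some (1, 0)
      else if c == "y" then some (-1, -1)
      else none
  else
    -- mid = (lo + hi) // 2 (inlined at both uses)
    match scanDC w lo ((lo + hi) / 2), scanDC w ((lo + hi) / 2) hi with
    | some (t1, m1), some (t2, m2) => some (t1 + t2, min m1 (t1 + m2))
    | _, _ => none
  termination_by hi - lo
  decreasing_by all_goals omega

def is_dyck_alt (w : List String) : Bool :=
  decide (scanDC w 0 w.length = some (0, 0))

-- ===== PRECONDITION & SPEC =====
def Spec_is_dyck (w : List String) (out : Bool) : Prop := out = is_dyck_alt w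
instance (w : List String) (out : Bool) : Decidable (Spec_is_dyck w out) := by unfold Spec_is_dyck; infer_instance

-- ===== CLAIM (what is proved, stated in full; the proofs are below) =====
def Claim_equal_is_dyck : Prop := ∀ (w : List String), Dom_is_dyck w → Spec_is_dyck w (is_dyck w)

-- ===== LEMMAS AND PROOFS =====

-- step of a character, total balance and minimum prefix sum of a word
def pvDelta (c : String) : Int := if c == "x" then 1 else if c == "y" then -1 else 0

def pvBal : List String → Int
  | [] => 0
  | c :: t => pvDelta c + pvBal t

def pvMinp : List String → Int
  | [] => 0
  | c :: t => min 0 (pvDelta c + pvMinp t)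

abbrev pvAllXY (l : List String) : Prop := ∀ c ∈ l, c = "x" ∨ c = "y"

theorem pvMinp_le_zero (l : List String) : pvMinp l ≤ 0 := by
  cases l with
  | nil => simp [pvMinp]
  | cons c t => simp [pvMinp]

theorem pvBal_append (u v : List String) : pvBal (u ++ v) = pvBal u + pvBal v := by
  induction u with
  | nil => simp [pvBal]
  | cons c t ih => simp [pvBal, ih]; ring

theorem pvMinp_append (u v : List String) :
    pvMinp (u ++ v) = min (pvMinp u) (pvBal u + pvMinp v) := by
  induction u with
  | nil => simp [pvMinp, pvBal, pvMinp_le_zero]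
  | cons c t ih =>
    simp only [List.cons_append, pvMinp, pvBal, ih]
    omega

theorem pvAllXY_append (u v : List String) :
    pvAllXY (u ++ v) ↔ pvAllXY u ∧ pvAllXY v := by
  unfold pvAllXY
  constructor
  · intro h
    exact ⟨fun c hc => h c (List.mem_append.mpr (Or.inl hc)),
           fun c hc => h c (List.mem_append.mpr (Or.inr hc))⟩
  · rintro ⟨h1, h2⟩ c hc
    rcases List.mem_append.mp hc with hc | hc
    · exact h1 c hc
    · exact h2 c hc

-- the summary function scanDC computes on w[lo:hi]
def pvSummary (l : List String) : Option (Int × Int) :=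
  if pvAllXY l then some (pvBal l, pvMinp l) else none

theorem scanDC_correct (w : List String) : ∀ n lo hi, hi - lo = n → lo ≤ hi → hi ≤ w.length →
    scanDC w lo hi = pvSummary ((w.drop lo).take (hi - lo)) := by
  intro n
  induction n using Nat.strong_induction_on with
  | _ n ih =>
    intro lo hi hn hle hlen
    rw [scanDC]
    by_cases h0 : hi - lo = 0
    · simp [h0, pvSummary, pvAllXY, pvBal, pvMinp]
    · by_cases h1 : hi - lo = 1
      · have hlt : lo < w.length := by omega
        have : PySem.List.pyGet? w (lo : Int) = some w[lo] :=
          PySem.List.pyGet?_ofNat w lo hlt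
        have htake : (w.drop lo).take (hi - lo) = [w[lo]] := by
          rw [h1]
          have : lo < w.length := hlt
          rw [List.take_one]
          simp [List.head?_drop, List.getElem?_eq_getElem hlt]
        rw [if_neg h0, if_pos h1, this, htake]
        by_cases hx : w[lo] = "x"
        · simp [hx, pvSummary, pvAllXY, pvBal, pvMinp, pvDelta]
        · by_cases hy : w[lo] = "y"
          · simp [hy, pvSummary, pvAllXY, pvBal, pvMinp, pvDelta]
          · simp [hx, hy, pvSummary, pvAllXY]
      · rw [if_neg h0, if_neg h1]
        have h2 : 2 ≤ hi - lo := by omega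
        have hmid1 : lo < (lo + hi) / 2 := by omega
        have hmid2 : (lo + hi) / 2 < hi := by omega
        rw [ih ((lo + hi) / 2 - lo) (by omega) lo ((lo + hi) / 2) rfl (by omega) (by omega),
            ih (hi - (lo + hi) / 2) (by omega) ((lo + hi) / 2) hi rfl (by omega) hlen]
        have hsplit : (w.drop lo).take (hi - lo) =
            (w.drop lo).take ((lo + hi) / 2 - lo) ++
            (w.drop ((lo + hi) / 2)).take (hi - (lo + hi) / 2) := by
          have hsum : hi - lo = ((lo + hi) / 2 - lo) + (hi - (lo + hi) / 2) := by omega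
          have hmid' : lo + ((lo + hi) / 2 - lo) = (lo + hi) / 2 := by omega
          rw [hsum, List.take_add, List.drop_drop, hmid']
        rw [hsplit]
        set u := (w.drop lo).take ((lo + hi) / 2 - lo)
        set v := (w.drop ((lo + hi) / 2)).take (hi - (lo + hi) / 2)
        unfold pvSummary
        by_cases hu : pvAllXY u
        · by_cases hv : pvAllXY v
          · rw [if_pos hu, if_pos hv, if_pos ((pvAllXY_append u v).mpr ⟨hu, hv⟩)]
            simp [pvBal_append, pvMinp_append]
          · rw [if_pos hu, if_neg hv,
              if_neg (fun h => hv ((pvAllXY_append u v).mp h).2)]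
        · rw [if_neg hu, if_neg (fun h => hu ((pvAllXY_append u v).mp h).1)]

-- counts of "x" and "y" never exceed the length
theorem count_xy_le (w : List String) : w.count "x" + w.count "y" ≤ w.length := by
  induction w with
  | nil => simp
  | cons c rest ih =>
    simp only [List.count_cons, List.length_cons]
    by_cases hx : c = "x" <;> by_cases hy : c = "y" <;> simp [hx, hy] <;> omega

-- counts of "x" and "y" sum to the length exactly when every element is "x" or "y"
theorem count_xy_eq_length (w : List String) :
    w.count "x" + w.count "y" = w.length ↔ pvAllXY w := by
  unfold pvAllXY
  induction w with
  | nil => simp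
  | cons c rest ih =>
    have hle := count_xy_le rest
    simp only [List.count_cons, List.length_cons, List.mem_cons]
    by_cases hx : c = "x"
    · simp only [hx]
      constructor
      · intro h d hd
        rcases hd with rfl | hd
        · exact Or.inl rfl
        · exact (ih.mp (by simp at h; omega)) d hd
      · intro h
        have := ih.mpr (fun d hd => h d (Or.inr hd))
        simp
        omega
    · by_cases hy : c = "y"
      · simp only [hy]
        constructor
        · intro h d hd
          rcases hd with rfl | hd
          · exact Or.inr rfl
          · exact (ih.mp (by simp at h; omega)) d hd
        · intro h
          have := ih.mpr (fun d hd => h d (Or.inr hd))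
          simp
          omega
      · constructor
        · intro h
          exfalso
          simp [hx, hy] at h
          omega
        · intro h
          exact absurd (h c (Or.inl rfl)) (by simp [hx, hy])

theorem pvBal_eq_counts (w : List String) :
    pvBal w = (w.count "x" : Int) - (w.count "y" : Int) := by
  induction w with
  | nil => simp [pvBal]
  | cons c rest ih =>
    simp only [pvBal, pvDelta, List.count_cons, ih]
    by_cases hx : c = "x" <;> by_cases hy : c = "y" <;> simp [hx, hy] <;> push_cast <;> omega

-- A's loop accepts from height h (0 ≤ h) iff the min prefix sum keeps h + sums nonnegative
theorem isDyckLoopA_iff (w : List String) : ∀ h : Int, 0 ≤ h →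
    (isDyckLoopA w h = true ↔ 0 ≤ h + pvMinp w) := by
  induction w with
  | nil => intro h hh; simp [isDyckLoopA, pvMinp]; omega
  | cons c rest ih =>
    intro h hh
    have hm := pvMinp_le_zero rest
    by_cases hx : c = "x"
    · subst hx
      have hneg : ¬ (h + 1 < 0) := by omega
      rw [show isDyckLoopA ("x" :: rest) h = isDyckLoopA rest (h + 1) by
        simp [isDyckLoopA, hneg]]
      rw [ih (h + 1) (by omega)]
      simp only [pvMinp, pvDelta]
      simp
      omega
    · by_cases hy : c = "y"
      · subst hy
        by_cases hneg : h - 1 < 0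
        · rw [show isDyckLoopA ("y" :: rest) h = false by simp [isDyckLoopA, hneg]]
          simp only [pvMinp, pvDelta]
          simp
          omega
        · rw [show isDyckLoopA ("y" :: rest) h = isDyckLoopA rest (h - 1) by
            simp [isDyckLoopA, hneg]]
          rw [ih (h - 1) (by omega)]
          simp only [pvMinp, pvDelta]
          simp
          omega
      · have hneg : ¬ (h < 0) := by omega
        rw [show isDyckLoopA (c :: rest) h = isDyckLoopA rest h by
          simp [isDyckLoopA, hx, hy, hneg]]
        rw [ih h hh]
        simp [pvMinp, pvDelta, hx, hy]
        omega

theorem is_dyck_eq_alt (w : List String) : is_dyck w = is_dyck_alt w := by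
  have halt : is_dyck_alt w = decide (pvAllXY w ∧ pvBal w = 0 ∧ pvMinp w = 0) := by
    unfold is_dyck_alt
    rw [scanDC_correct w w.length 0 w.length rfl (by omega) le_rfl]
    simp only [List.drop_zero, Nat.sub_zero, List.take_length, pvSummary]
    by_cases hxy : pvAllXY w
    · simp [Prod.ext_iff]
    · simp [hxy]
  rw [halt]
  unfold is_dyck
  simp only [PySem.List.count_eq]
  by_cases hg : (w.count "x" : Int) ≠ (w.count "y" : Int) ∨
      (w.count "x" : Int) + (w.count "y" : Int) ≠ (w.length : Int)
  · rw [if_pos hg]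
    have : ¬ (pvAllXY w ∧ pvBal w = 0 ∧ pvMinp w = 0) := by
      rintro ⟨hall, hbal, _⟩
      have hlen := (count_xy_eq_length w).mpr hall
      rw [pvBal_eq_counts] at hbal
      rcases hg with hne | hne
      · exact hne (by omega)
      · exact hne (by push_cast; omega)
    simp [this]
  · rw [if_neg hg]
    rw [not_or, not_not, not_not] at hg
    obtain ⟨heq, hlen⟩ := hg
    have hall : pvAllXY w := (count_xy_eq_length w).mp (by omega)
    have hbal : pvBal w = 0 := by rw [pvBal_eq_counts]; omega
    have hm := pvMinp_le_zero w
    have hloop := isDyckLoopA_iff w 0 le_rfl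
    by_cases hz : pvMinp w = 0
    · rw [hloop.mpr (by omega)]
      simp [hbal, hz]
      exact hall
    · have hf : isDyckLoopA w 0 = false := by
        cases hb : isDyckLoopA w 0
        · rfl
        · exact absurd (hloop.mp hb) (by omega)
      rw [hf]
      simp [hz]

-- ===== VERDICT (by name: the statement is the Claim_ definition above) =====
theorem is_dyck_spec : Claim_equal_is_dyck := by
  intro w _
  unfold Spec_is_dyck
  exact is_dyck_eq_alt w
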